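-- pv_equiv track=rewrite | github.com/lavague-ai/lavague_experiments | op_sm+split.py | unchunk_dicts
-- ===== SOURCE A (Python) =====
-- def unchunk_dicts(grouped_chunks):
--     flat_list = []
--     for group in grouped_chunks:
--         max_length = max(len(v) for v in group.values())
--         for i in range(max_length):
--             new_dict = {}
--             for key, values in group.items():
--                 if i < len(values):
--                     if values[i] != '':
--                         new_dict[key] = values[i]
--             if new_dict:
--                 flat_list.append(new_dict)
--     return flat_list
-- ===== SOURCE B (Python) =====
-- def unchunk_dicts(grouped_chunks):
--     # Key-major scatter: walk each key's value list once, dropping each value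
--     # into the row dict for its position; no max_length / range indexing.
--     flat_list = []
--     for group in grouped_chunks:
--         rows = []
--         for key, values in group.items():
--             for i, v in enumerate(values):
--                 if i == len(rows):
--                     rows.append({})
--                 if v != '':
--                     rows[i][key] = v
--         flat_list.extend(r for r in rows if r)
--     return flat_list
-- ===== Notes on version B (the rewrite author's own statement) =====
-- stated objective: alternative
-- what changed: B replaces A's index-major gather (compute max_length, then for each index re-scan every key) by a key-major scatter: each value list is walked once and each value dropped into the row dict for its position, so max_length and the per-index rescans disappear.
import Mathlib
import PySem

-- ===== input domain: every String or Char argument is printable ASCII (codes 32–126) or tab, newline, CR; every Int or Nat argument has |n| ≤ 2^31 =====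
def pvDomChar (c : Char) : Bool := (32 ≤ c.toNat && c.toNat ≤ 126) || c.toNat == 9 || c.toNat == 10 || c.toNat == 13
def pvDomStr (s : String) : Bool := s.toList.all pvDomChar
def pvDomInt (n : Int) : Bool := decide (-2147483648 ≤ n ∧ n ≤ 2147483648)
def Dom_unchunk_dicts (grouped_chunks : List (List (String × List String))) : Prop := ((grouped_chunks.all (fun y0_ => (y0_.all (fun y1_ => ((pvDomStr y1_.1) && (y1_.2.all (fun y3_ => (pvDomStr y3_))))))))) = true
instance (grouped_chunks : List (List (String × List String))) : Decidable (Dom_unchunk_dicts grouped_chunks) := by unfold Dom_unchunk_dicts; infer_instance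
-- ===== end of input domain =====

-- B replaces A's index-major gather (max_length + per-index rescan of the keys) by a
-- key-major scatter that walks each value list once; alternative decomposition, same cost class.


-- ===== PORT A =====
-- max(len(v) for v in group.values()): Python raises ValueError when group is empty
-- (excluded by Pre_); on a nonempty group the foldl with initial 0 is that maximum,
-- since lengths are ≥ 0.  new_dict[key] = values[i] is an append because the keys of
-- a Python dict (one group) are distinct.  values[i] with 0 ≤ i < len(values) is getD.
def unchunk_dicts (grouped_chunks : List (List (String × List String))) : List (List (String × String)) :=
  grouped_chunks.foldl (fun flat_list group =>
    let max_length := (group.map (fun kv => kv.2.length)).foldl Nat.max 0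
    (List.range max_length).foldl (fun (fl : List (List (String × String))) i =>
      let new_dict : List (String × String) := group.foldl (fun d kv =>
        if i < kv.2.length then
          if kv.2.getD i "" ≠ "" then d ++ [(kv.1, kv.2.getD i "")] else d
        else d) []
      if new_dict.isEmpty then fl else fl ++ [new_dict]) flat_list) []

-- ===== PORT B =====
-- inner `for i, v in enumerate(values)` loop of Source B: drop each value of one key's list
-- into the row dict for its position (rows[i][key] = v is an append: key is new to rows[i]).
def pvScatter (key : String) (vals : List String) (i : Nat) (rows : List (List (String × String))) : List (List (String × String)) :=
  match vals with
  | [] => rows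
  | v :: vs =>
      let rows1 := if i = rows.length then rows ++ [[]] else rows
      let rows2 := if v ≠ "" then rows1.modify i (fun r => r ++ [(key, v)]) else rows1
      pvScatter key vs (i + 1) rows2

def unchunk_dicts_alt (grouped_chunks : List (List (String × List String))) : List (List (String × String)) :=
  grouped_chunks.foldl (fun flat_list group =>
    let rows := group.foldl (fun rows kv => pvScatter kv.1 kv.2 0 rows) []
    flat_list ++ rows.filter (fun r => !r.isEmpty)) []

-- ===== PRECONDITION & SPEC =====
-- Pre_ excludes exactly the inputs where A raises: a group that is an empty dict makes
-- max() raise ValueError.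
def Pre_unchunk_dicts (grouped_chunks : List (List (String × List String))) : Prop :=
  ∀ group ∈ grouped_chunks, group ≠ []
instance (grouped_chunks : List (List (String × List String))) : Decidable (Pre_unchunk_dicts grouped_chunks) := by unfold Pre_unchunk_dicts; infer_instance
def pvWitness_unchunk_dicts : (List (List (String × List String))) := [[("a", ["x", ""]), ("b", ["y"])]]

def Spec_unchunk_dicts (grouped_chunks : List (List (String × List String))) (out : List (List (String × String))) : Prop := out = unchunk_dicts_alt grouped_chunks
instance (grouped_chunks : List (List (String × List String))) (out : List (List (String × String))) : Decidable (Spec_unchunk_dicts grouped_chunks out) := by unfold Spec_unchunk_dicts; infer_instance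

-- ===== CLAIM (what is proved, stated in full; the proofs are below) =====
def Claim_equal_unchunk_dicts : Prop := ∀ (grouped_chunks : List (List (String × List String))), Dom_unchunk_dicts grouped_chunks → Pre_unchunk_dicts grouped_chunks → Spec_unchunk_dicts grouped_chunks (unchunk_dicts grouped_chunks)

-- ===== LEMMAS AND PROOFS =====

theorem pvScatter_length (key : String) (vals : List String) : ∀ (i : Nat)
    (rows : List (List (String × String))), i ≤ rows.length →
    (pvScatter key vals i rows).length = Nat.max rows.length (i + vals.length) := by
  induction vals with
  | nil => intro i rows h; simp [pvScatter]; omega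
  | cons v vs ih =>
    intro i rows h
    simp only [pvScatter]
    have h2 : (if v ≠ "" then (if i = rows.length then rows ++ [[]] else rows).modify i (fun r => r ++ [(key, v)]) else (if i = rows.length then rows ++ [[]] else rows)).length = Nat.max rows.length (i+1) := by
      split_ifs <;>
        simp only [List.length_modify, List.length_append, List.length_cons, List.length_nil, Nat.max_def] <;>
        split_ifs <;> omega
    rw [ih (i+1) _ (by rw [h2]; exact Nat.le_max_right _ _), h2]
    simp [Nat.max_def]; split_ifs <;> omega

theorem pvStep_getD (key v : String) (i : Nat) (rows : List (List (String × String)))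
    (h : i ≤ rows.length) (j : Nat) :
    (if v ≠ "" then (if i = rows.length then rows ++ [[]] else rows).modify i (fun r => r ++ [(key, v)]) else (if i = rows.length then rows ++ [[]] else rows)).getD j [] =
      rows.getD j [] ++ (if j = i ∧ v ≠ "" then [(key, v)] else []) := by
  have hrows1 : ∀ jj : Nat, (if i = rows.length then rows ++ [[]] else rows).getD jj [] = rows.getD jj [] := by
    intro jj
    split
    · rcases lt_or_ge jj rows.length with h1 | h1
      · rw [List.getD_eq_getElem?_getD, List.getElem?_append_left h1, ← List.getD_eq_getElem?_getD]
      · rw [List.getD_eq_getElem?_getD, List.getElem?_append_right h1,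
            List.getD_eq_getElem?_getD (l := rows), List.getElem?_eq_none h1]
        cases jj - rows.length <;> simp
    · rfl
  by_cases hv : v = ""
  · rw [if_neg (by simp [hv]), hrows1 j, if_neg (by simp [hv]), List.append_nil]
  · have hi1 : i < (if i = rows.length then rows ++ [[]] else rows).length := by
      split <;> (try simp) <;> omega
    rw [if_pos (by simpa using hv)]
    by_cases hj : j = i
    · subst hj
      have hr := hrows1 j
      rw [List.getD_eq_getElem?_getD, List.getElem?_eq_getElem hi1] at hr
      simp only [Option.getD_some] at hr
      rw [List.getD_eq_getElem?_getD, List.getElem?_modify, List.getElem?_eq_getElem hi1]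
      simp only [Option.map_eq_map, Option.map_some, Option.getD_some]
      rw [hr]
      simp [hv]
    · rw [List.getD_eq_getElem?_getD, List.getElem?_modify]
      simp only [if_neg (Ne.symm hj)]
      have hmap : ((fun (a : List (String × String)) => a) <$> ((if i = rows.length then rows ++ [[]] else rows)[j]?)) = (if i = rows.length then rows ++ [[]] else rows)[j]? := by
        cases hx : (if i = rows.length then rows ++ [[]] else rows)[j]? <;> simp
      rw [hmap, ← List.getD_eq_getElem?_getD, hrows1 j, if_neg (by simp [hj]), List.append_nil]

theorem pvScatter_getD (key : String) (vals : List String) : ∀ (i : Nat)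
    (rows : List (List (String × String))), i ≤ rows.length → ∀ j : Nat,
    (pvScatter key vals i rows).getD j [] =
      rows.getD j [] ++
        (if i ≤ j ∧ j - i < vals.length ∧ vals.getD (j - i) "" ≠ ""
         then [(key, vals.getD (j - i) "")] else []) := by
  induction vals with
  | nil => intro i rows h j; simp [pvScatter]
  | cons v vs ih =>
    intro i rows h j
    simp only [pvScatter]
    have hlen2 : (if v ≠ "" then (if i = rows.length then rows ++ [[]] else rows).modify i (fun r => r ++ [(key, v)]) else (if i = rows.length then rows ++ [[]] else rows)).length = Nat.max rows.length (i+1) := by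
      split_ifs <;> simp only [List.length_modify, List.length_append, List.length_cons, List.length_nil, Nat.max_def] <;> split_ifs <;> omega
    rw [ih (i+1) _ (by rw [hlen2]; exact Nat.le_max_right _ _) j, pvStep_getD key v i rows h j,
        List.append_assoc]
    congr 1
    by_cases hj : j = i
    · subst hj
      rw [if_neg (show ¬(j + 1 ≤ j ∧ j - (j + 1) < vs.length ∧ vs.getD (j - (j + 1)) "" ≠ "")
            from fun hc => absurd hc.1 (by omega)), List.append_nil, Nat.sub_self]
      by_cases hv : v = "" <;> simp [hv]
    · rcases lt_or_gt_of_ne hj with hlt | hgt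
      · rw [if_neg (by simp [hj]),
            if_neg (fun hc => absurd hc.1 (by omega : ¬ (i + 1 ≤ j))),
            if_neg (fun hc => absurd hc.1 (by omega : ¬ (i ≤ j)))]
        rfl
      · rw [if_neg (by simp [hj])]
        have hk : j - i = (j - (i + 1)) + 1 := by omega
        rw [hk]
        simp only [List.getD_cons_succ, List.nil_append, List.length_cons]
        split_ifs with h1 h2 h3
        · rfl
        · obtain ⟨h1a, h1b, h1c⟩ := h1
          exact absurd ⟨by omega, by omega, h1c⟩ h2
        · obtain ⟨h3a, h3b, h3c⟩ := h3
          exact absurd ⟨by omega, by omega, h3c⟩ h1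
        · rfl

def pvColf (group : List (String × List String)) (i : Nat) : List (String × String) :=
  (group.filter (fun kv => decide (i < kv.2.length ∧ kv.2.getD i "" ≠ ""))).map
    (fun kv => (kv.1, kv.2.getD i ""))

def pvMaxLen (group : List (String × List String)) : Nat :=
  (group.map (fun kv => kv.2.length)).foldl Nat.max 0

def pvRows (group : List (String × List String)) : List (List (String × String)) :=
  group.foldl (fun rows kv => pvScatter kv.1 kv.2 0 rows) []

theorem pvMaxLen_append (g : List (String × List String)) (kv : String × List String) :
    pvMaxLen (g ++ [kv]) = Nat.max (pvMaxLen g) kv.2.length := by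
  simp [pvMaxLen, List.map_append, List.foldl_append]

theorem pvColf_append (g : List (String × List String)) (kv : String × List String) (j : Nat) :
    pvColf (g ++ [kv]) j = pvColf g j ++
      (if j < kv.2.length ∧ kv.2.getD j "" ≠ "" then [(kv.1, kv.2.getD j "")] else []) := by
  simp only [pvColf, List.filter_append, List.map_append]
  congr 1
  by_cases hc : (j < kv.2.length ∧ kv.2.getD j "" ≠ "")
  · rw [if_pos hc, List.filter_singleton, decide_eq_true hc, cond_true]
    rfl
  · rw [if_neg hc, List.filter_singleton, decide_eq_false hc, cond_false]
    rfl

theorem pvRows_append (g : List (String × List String)) (kv : String × List String) :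
    pvRows (g ++ [kv]) = pvScatter kv.1 kv.2 0 (pvRows g) := by
  simp [pvRows, List.foldl_append]

theorem pvRows_length (g : List (String × List String)) :
    (pvRows g).length = pvMaxLen g := by
  induction g using List.reverseRecOn with
  | nil => simp [pvRows, pvMaxLen]
  | append_singleton g kv ih =>
    rw [pvRows_append, pvScatter_length _ _ 0 _ (Nat.zero_le _), ih, pvMaxLen_append]
    simp

theorem pvRows_getD (g : List (String × List String)) (j : Nat) :
    (pvRows g).getD j [] = pvColf g j := by
  induction g using List.reverseRecOn with
  | nil => simp [pvRows, pvColf]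
  | append_singleton g kv ih =>
    rw [pvRows_append, pvScatter_getD kv.1 kv.2 0 _ (Nat.zero_le _) j, ih, pvColf_append]
    congr 1
    simp

theorem pvRows_eq (g : List (String × List String)) :
    pvRows g = (List.range (pvMaxLen g)).map (pvColf g) := by
  apply List.ext_getElem
  · simp [pvRows_length]
  · intro j h1 h2
    have hg := pvRows_getD g j
    rw [List.getD_eq_getElem?_getD, List.getElem?_eq_getElem h1] at hg
    simp only [Option.getD_some] at hg
    simp [hg]

theorem pvInner_eq (group : List (String × List String)) (i : Nat) :
    group.foldl (fun d kv =>
        if i < kv.2.length then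
          if kv.2.getD i "" ≠ "" then d ++ [(kv.1, kv.2.getD i "")] else d
        else d) ([] : List (String × String)) = pvColf group i := by
  have hfun : (fun (d : List (String × String)) kv =>
      if i < kv.2.length then
        if kv.2.getD i "" ≠ "" then d ++ [(kv.1, kv.2.getD i "")] else d
      else d)
      = (fun d kv => if (fun (kv : String × List String) => decide (i < kv.2.length ∧ kv.2.getD i "" ≠ "")) kv = true
          then d ++ [(fun (kv : String × List String) => (kv.1, kv.2.getD i "")) kv] else d) := by
    funext d kv
    by_cases h1 : i < kv.2.length <;> simp [h1]
  rw [hfun, PySem.List.foldl_append_if]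
  simp [pvColf]

theorem pvA_group (g : List (String × List String)) (flat : List (List (String × String))) :
    (List.range ((g.map (fun kv => kv.2.length)).foldl Nat.max 0)).foldl
      (fun (fl : List (List (String × String))) i =>
        let new_dict : List (String × String) := g.foldl (fun d kv =>
          if i < kv.2.length then
            if kv.2.getD i "" ≠ "" then d ++ [(kv.1, kv.2.getD i "")] else d
          else d) []
        if new_dict.isEmpty then fl else fl ++ [new_dict]) flat
    = flat ++ (pvRows g).filter (fun r => !r.isEmpty) := by
  simp only [pvInner_eq]
  have hfun : (fun (fl : List (List (String × String))) i =>
      if (pvColf g i).isEmpty then fl else fl ++ [pvColf g i])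
      = (fun fl i => if (fun i => !(pvColf g i).isEmpty) i = true then fl ++ [pvColf g i] else fl) := by
    funext fl i
    cases h : (pvColf g i).isEmpty <;> simp [h]
  rw [hfun, PySem.List.foldl_append_if, pvRows_eq, List.filter_map]
  rfl

theorem pvMain (gc : List (List (String × List String))) : ∀ flat,
    gc.foldl (fun flat_list group =>
      let max_length := (group.map (fun kv => kv.2.length)).foldl Nat.max 0
      (List.range max_length).foldl (fun (fl : List (List (String × String))) i =>
        let new_dict : List (String × String) := group.foldl (fun d kv =>
          if i < kv.2.length then
            if kv.2.getD i "" ≠ "" then d ++ [(kv.1, kv.2.getD i "")] else d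
          else d) []
        if new_dict.isEmpty then fl else fl ++ [new_dict]) flat_list) flat
    = gc.foldl (fun flat_list group =>
      let rows := group.foldl (fun rows kv => pvScatter kv.1 kv.2 0 rows) []
      flat_list ++ rows.filter (fun r => !r.isEmpty)) flat := by
  induction gc with
  | nil => intro flat; rfl
  | cons g gc ih =>
    intro flat
    simp only [List.foldl_cons]
    rw [pvA_group g flat]
    exact ih _

-- ===== VERDICT (by name: the statement is the Claim_ definition above) =====
theorem unchunk_dicts_spec : Claim_equal_unchunk_dicts := by
  intro gc _ _
  unfold Spec_unchunk_dicts unchunk_dicts unchunk_dicts_alt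
  exact pvMain gc []
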